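-- pv_equiv track=rewrite | github.com/ethereum/research | mimc_stark/recovery.py | multi_inv
-- ===== SOURCE A (Python) =====
-- def multi_inv(values, modulus):
--     partials = [1]
--     for i in range(len(values)):
--         partials.append(partials[-1] * values[i] % modulus)
--     inv = pow(partials[-1], modulus - 2, modulus)
--     outputs = [0] * len(values)
--     for i in range(len(values), 0, -1):
--         outputs[i-1] = partials[i-1] * inv % modulus
--         inv = inv * values[i-1] % modulus
--     return outputs
-- ===== SOURCE B (Python) =====
-- def multi_inv(values, modulus):
--     # Divide-and-conquer product tree: one Fermat inverse of the whole product,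
--     # then push it down a binary split, multiplying each half by the reduced
--     # product of the opposite half; leaves receive their own inverse directly.
--     total = 1
--     for v in values:
--         total = total * v % modulus
--     tinv = pow(total, modulus - 2, modulus)
--
--     def rec(vals, c):
--         # invariant: c == tinv * (product of all values outside vals) mod modulus
--         if len(vals) <= 1:
--             return [c] if vals else []
--         k = len(vals) // 2
--         left, right = vals[:k], vals[k:]
--         pl = 1
--         for v in left:
--             pl = pl * v % modulus
--         pr = 1
--         for v in right:
--             pr = pr * v % modulus
--         return rec(left, c * pr % modulus) + rec(right, c * pl % modulus)
--
--     return rec(values, tinv)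
-- ===== Notes on version B (the rewrite author's own statement) =====
-- stated objective: alternative
-- what changed: B replaces A's two linear passes with a scalar backward inverse accumulator by a divide-and-conquer product tree: one Fermat inverse of the total product is pushed down a recursive binary split, each half receiving the inverse multiplied by the reduced product of the opposite half.
-- outside the precondition, e.g. on multi_inv([3], -7): A returns [-1], B returns [-1]; on multi_inv([2], -6): A raises ValueError, B raises ValueError; on multi_inv([2], 0): A raises ZeroDivisionError, B raises ZeroDivisionError
import Mathlib
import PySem

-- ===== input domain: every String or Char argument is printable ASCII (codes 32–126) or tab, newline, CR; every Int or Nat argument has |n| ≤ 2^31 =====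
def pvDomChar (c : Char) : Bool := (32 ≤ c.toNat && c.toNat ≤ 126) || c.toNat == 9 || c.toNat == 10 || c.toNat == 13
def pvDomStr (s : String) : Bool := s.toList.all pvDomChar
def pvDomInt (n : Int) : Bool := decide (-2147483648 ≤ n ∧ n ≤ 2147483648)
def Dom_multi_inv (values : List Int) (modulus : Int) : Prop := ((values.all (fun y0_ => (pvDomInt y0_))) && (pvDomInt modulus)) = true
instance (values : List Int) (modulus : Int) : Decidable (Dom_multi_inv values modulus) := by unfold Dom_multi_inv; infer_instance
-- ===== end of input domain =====

-- B replaces A's two linear passes (prefix products, then a backward pass threading a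
-- scalar inverse accumulator) by a divide-and-conquer product tree: one Fermat inverse
-- of the total product is pushed down a recursive binary split of the list.

-- ===== PORT A =====
-- shared port of Python's built-in pow(b, e, m), exact on Pre_'s domain (modulus ≥ 1):
-- for e ≥ 0 square-and-multiply with step-wise reduction (the value of PySem.Int.powMod,
-- computed so that it also evaluates for 2^31-sized exponents); within Pre_ the exponent
-- modulus-2 is negative only for modulus = 1, where Python's pow returns 0.
def pyPowAux (b m : Int) (e : Nat) : Int :=
  if e = 0 then PySem.Int.mod 1 m
  else
    let h := pyPowAux b m (e / 2)
    let s := PySem.Int.mod (h * h) m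
    if e % 2 = 1 then PySem.Int.mod (s * b) m else s
termination_by e
decreasing_by exact Nat.div_lt_self (Nat.pos_of_ne_zero (by omega)) (by omega)

def pyPow3 (b e m : Int) : Int :=
  if e < 0 then 0 else pyPowAux b m e.toNat

def multi_inv (values : List Int) (modulus : Int) : List Int :=
  let partials : List Int :=
    (PySem.List.pyRange 0 (PySem.List.len values) 1).foldl
      (fun ps i =>
        ps ++ [PySem.Int.mod (PySem.List.pyGetD ps (-1) 0 * PySem.List.pyGetD values i 0) modulus])
      [1]
  let inv : Int := pyPow3 (PySem.List.pyGetD partials (-1) 0) (modulus - 2) modulus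
  let st :=
    (PySem.List.pyRange (PySem.List.len values) 0 (-1)).foldl
      (fun (st : List Int × Int) i =>
        (PySem.List.pySetD st.1 (i - 1)
           (PySem.Int.mod (PySem.List.pyGetD partials (i - 1) 0 * st.2) modulus),
         PySem.Int.mod (st.2 * PySem.List.pyGetD values (i - 1) 0) modulus))
      (List.replicate values.length 0, inv)
  st.1

-- ===== PORT B =====
-- Source B's reducing product loop: p = 1; for v in vs: p = p * v % modulus
def segProd (modulus : Int) (vs : List Int) : Int :=
  vs.foldl (fun p v => PySem.Int.mod (p * v) modulus) 1

-- Source B's 'rec': binary split; vals[:k]/vals[k:] with 0 ≤ k ≤ len are exactly take/drop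
def combine (modulus : Int) (vs : List Int) (c : Int) : List Int :=
  if vs.length ≤ 1 then (if vs.isEmpty then [] else [c])
  else
    let k := vs.length / 2
    let left := vs.take k
    let right := vs.drop k
    combine modulus left (PySem.Int.mod (c * segProd modulus right) modulus) ++
      combine modulus right (PySem.Int.mod (c * segProd modulus left) modulus)
termination_by vs.length
decreasing_by
  · simp only [List.length_take]; omega
  · simp only [List.length_drop]; omega

def multi_inv_alt (values : List Int) (modulus : Int) : List Int :=
  let total : Int := segProd modulus values
  let tinv : Int := pyPow3 total (modulus - 2) modulus
  combine modulus values tinv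

-- ===== PRECONDITION & SPEC =====
-- Pre_ restricts to positive moduli (the intended prime-field setting): for modulus ≤ 0,
-- A raises (ZeroDivisionError at 0, ValueError on non-invertible negative moduli), and on
-- the remaining negative moduli both programs return the same value via the same
-- negative-exponent pow builtin, which the ports do not model.
def Pre_multi_inv (values : List Int) (modulus : Int) : Prop := 1 ≤ modulus
instance (values : List Int) (modulus : Int) : Decidable (Pre_multi_inv values modulus) := by
  unfold Pre_multi_inv; infer_instance

def pvWitness_multi_inv : List Int × Int := ([2, 3], 5)

def Spec_multi_inv (values : List Int) (modulus : Int) (out : List Int) : Prop := out = multi_inv_alt values modulus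
instance (values : List Int) (modulus : Int) (out : List Int) : Decidable (Spec_multi_inv values modulus out) := by unfold Spec_multi_inv; infer_instance

-- ===== CLAIM (what is proved, stated in full; the proofs are below) =====
def Claim_equal_multi_inv : Prop := ∀ (values : List Int) (modulus : Int), Dom_multi_inv values modulus → Pre_multi_inv values modulus → Spec_multi_inv values modulus (multi_inv values modulus)

-- ===== LEMMAS AND PROOFS =====

-- A-proof helpers: structured views of A's first loop and of the backward accumulator
def prefixTab (modulus : Int) (p : Int) : List Int → List Int
  | [] => [p]
  | v :: vs => p :: prefixTab modulus (PySem.Int.mod (p * v) modulus) vs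

def suffixTab (modulus : Int) : List Int → List Int
  | [] => [1]
  | v :: vs =>
    let s := suffixTab modulus vs
    PySem.Int.mod (s.headI * v) modulus :: s

theorem length_prefixTab (m : Int) : ∀ (vs : List Int) (p : Int), (prefixTab m p vs).length = vs.length + 1 := by
  intro vs
  induction vs with
  | nil => intro p; simp [prefixTab]
  | cons v vs ih => intro p; simp [prefixTab, ih]

theorem foldA_eq_prefixTab (m : Int) :
    ∀ (vs : List Int) (acc : List Int) (p : Int),
      vs.foldl (fun ps v => ps ++ [PySem.Int.mod (PySem.List.pyGetD ps (-1) 0 * v) m]) (acc ++ [p])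
        = acc ++ prefixTab m p vs := by
  intro vs
  induction vs with
  | nil => intro acc p; simp [prefixTab]
  | cons v vs ih =>
    intro acc p
    simp only [List.foldl_cons, PySem.List.pyGetD_neg_one_append_singleton, prefixTab]
    rw [ih (acc ++ [p])]
    simp

theorem suffixTab_getD (m : Int) :
    ∀ (vs : List Int) (i : Nat), i ≤ vs.length →
      (suffixTab m vs).getD i 0 = (suffixTab m (vs.drop i)).headI := by
  intro vs
  induction vs with
  | nil => intro i hi; simp at hi; subst hi; simp [suffixTab]
  | cons v vs ih =>
    intro i hi
    cases i with
    | zero => simp [suffixTab]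
    | succ j => simpa [suffixTab] using ih j (by simpa using hi)

theorem emod_absorb_right {m : Int} (a b : Int) : a * (b % m) % m = a * b % m := by
  conv_lhs => rw [Int.mul_emod, Int.emod_emod_of_dvd _ dvd_rfl, ← Int.mul_emod]

theorem emod_mul_congr {m a b : Int} (c : Int) (h : a % m = b % m) :
    (a * c) % m = (b * c) % m := by
  rw [Int.mul_emod a, Int.mul_emod b, h]

theorem mod_idem {m : Int} (hm : 0 < m) (x : Int) : PySem.Int.mod x m % m = PySem.Int.mod x m := by
  rw [PySem.Int.mod_eq_emod_of_pos hm]; exact Int.emod_emod_of_dvd x dvd_rfl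

theorem mod_mul_left {m : Int} (hm : 0 < m) (x y : Int) :
    (PySem.Int.mod x m * y) % m = (x * y) % m := by
  rw [PySem.Int.mod_eq_emod_of_pos hm, mul_comm, emod_absorb_right, mul_comm]

-- A's second loop writes exactly the prefix×suffix×tinv combination at every index
theorem loopA_eq (values : List Int) (m tinv : Int) (hm : 0 < m)
    (pre : List Int) :
    ∀ (k : Nat) (outs : List Int) (inv : Int), k ≤ values.length → outs.length = values.length →
      inv % m = (tinv * (suffixTab m (values.drop k)).headI) % m →
      ((PySem.List.pyRange (k : Int) 0 (-1)).foldl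
        (fun (st : List Int × Int) i =>
          (PySem.List.pySetD st.1 (i - 1)
             (PySem.Int.mod (PySem.List.pyGetD pre (i - 1) 0 * st.2) m),
           PySem.Int.mod (st.2 * PySem.List.pyGetD values (i - 1) 0) m))
        (outs, inv)).1
      = (List.range k).map
          (fun j => (pre.getD j 0 * (suffixTab m values).getD (j + 1) 0 * tinv) % m)
        ++ outs.drop k := by
  intro k
  induction k with
  | zero =>
    intro outs inv _ _ _
    rw [PySem.List.pyRange_neg_one_eq_nil (by norm_num)]
    simp
  | succ k ih =>
    intro outs inv hk hlen hinv
    have hkN : k < values.length := hk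
    rw [show ((k + 1 : Nat) : Int) = (k : Int) + 1 by push_cast; ring,
        PySem.List.pyRange_neg_one_cons (by positivity)]
    simp only [List.foldl_cons]
    have e1 : (k:Int) + 1 - 1 = ((k:Nat):Int) := by ring
    rw [e1]
    simp only [PySem.List.pySetD_natCast, PySem.List.pyGetD_natCast]
    have hsplit : values.drop k = values[k] :: values.drop (k + 1) :=
      List.drop_eq_getElem_cons hkN
    have hget : values.getD k 0 = values[k] := List.getD_eq_getElem values 0 hkN
    have hS : (suffixTab m (values.drop k)).headI
        = ((suffixTab m (values.drop (k+1))).headI * values[k]) % m := by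
      rw [hsplit]; simp [suffixTab, PySem.Int.mod_eq_emod_of_pos hm]
    have hinv' : (PySem.Int.mod (inv * values.getD k 0) m) % m
        = tinv * (suffixTab m (values.drop k)).headI % m := by
      rw [PySem.Int.mod_eq_emod_of_pos hm, Int.emod_emod_of_dvd _ dvd_rfl, hget, hS,
          emod_absorb_right, ← mul_assoc, emod_mul_congr values[k] hinv]
    rw [ih _ _ (le_of_lt hkN) (by simpa using hlen) hinv']
    have hklen : k < outs.length := by omega
    have hcell : PySem.Int.mod (pre.getD k 0 * inv) m
        = pre.getD k 0 * (suffixTab m values).getD (k + 1) 0 * tinv % m := by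
      have hsget : (suffixTab m values).getD (k+1) 0
          = (suffixTab m (values.drop (k+1))).headI := suffixTab_getD m values (k+1) hk
      rw [PySem.Int.mod_eq_emod_of_pos hm, hsget, mul_comm (pre.getD k 0) inv,
          emod_mul_congr (pre.getD k 0) hinv]
      congr 1; ring
    have hdrop : (outs.set k (PySem.Int.mod (pre.getD k 0 * inv) m)).drop k
        = (PySem.Int.mod (pre.getD k 0 * inv) m) :: outs.drop (k + 1) := by
      rw [List.drop_eq_getElem_cons (by simpa using hklen)]
      simp [List.getElem_set_self]
      exact List.drop_set_of_lt (by omega)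
    rw [hdrop, hcell, List.range_succ, List.map_append]
    simp

theorem prefixTab_ne_nil (m p : Int) (vs : List Int) : prefixTab m p vs ≠ [] := by
  have := length_prefixTab m vs p
  intro h; rw [h] at this; simp at this

-- last entry of the prefix table is exactly B's reducing product fold
theorem prefixTab_last (m : Int) :
    ∀ (vs : List Int) (p : Int),
      (prefixTab m p vs).getD vs.length 0
        = vs.foldl (fun x v => PySem.Int.mod (x * v) m) p := by
  intro vs
  induction vs with
  | nil => intro p; simp [prefixTab]
  | cons v vs ih => intro p; simpa [prefixTab] using ih (PySem.Int.mod (p * v) m)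

-- prefix-table entries are congruent to plain take-products
theorem prefixTab_getD_mod (m : Int) (hm : 0 < m) :
    ∀ (vs : List Int) (p : Int) (j : Nat), j ≤ vs.length →
      (prefixTab m p vs).getD j 0 % m = (p * (vs.take j).prod) % m := by
  intro vs
  induction vs with
  | nil =>
    intro p j hj
    simp only [List.length_nil, Nat.le_zero] at hj
    subst hj; simp [prefixTab]
  | cons v vs ih =>
    intro p j hj
    cases j with
    | zero => simp [prefixTab]
    | succ j =>
      have : (prefixTab m p (v :: vs)).getD (j+1) 0
          = (prefixTab m (PySem.Int.mod (p * v) m) vs).getD j 0 := by simp [prefixTab]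
      rw [this, ih _ j (by simpa using hj), mod_mul_left hm]
      simp [mul_assoc]

-- suffix-table heads are congruent to plain drop-products
theorem suffixTab_headI_mod (m : Int) (hm : 0 < m) :
    ∀ (vs : List Int), (suffixTab m vs).headI % m = vs.prod % m := by
  intro vs
  induction vs with
  | nil => simp [suffixTab]
  | cons v vs ih =>
    show PySem.Int.mod ((suffixTab m vs).headI * v) m % m = (v * vs.prod) % m
    rw [mod_idem hm, PySem.Int.mod_eq_emod_of_pos hm, emod_mul_congr v ih]
    congr 1; ring

-- B's reducing fold is congruent to the plain product
theorem foldProd_mod (m : Int) (hm : 0 < m) :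
    ∀ (vs : List Int) (a : Int),
      (vs.foldl (fun x v => PySem.Int.mod (x * v) m) a) % m = (a * vs.prod) % m := by
  intro vs
  induction vs with
  | nil => intro a; simp
  | cons v vs ih =>
    intro a
    simp only [List.foldl_cons, List.prod_cons]
    rw [ih, mod_mul_left hm]
    congr 1; ring

theorem segProd_mod (m : Int) (hm : 0 < m) (vs : List Int) :
    segProd m vs % m = vs.prod % m := by
  unfold segProd; rw [foldProd_mod m hm]; simp

theorem pyPowAux_mod (b m : Int) (hm : 0 < m) (e : Nat) :
    pyPowAux b m e % m = pyPowAux b m e := by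
  rw [pyPowAux.eq_def]
  split
  · exact mod_idem hm 1
  · dsimp only
    split
    · exact mod_idem hm _
    · exact mod_idem hm _

theorem pyPow3_mod (b e m : Int) (hm : 0 < m) : pyPow3 b e m % m = pyPow3 b e m := by
  unfold pyPow3
  split
  · simp
  · exact pyPowAux_mod b m hm _

theorem mod_mul3 {m : Int} {a a' b b' : Int} (t : Int)
    (ha : a % m = a' % m) (hb : b % m = b' % m) :
    (a * b * t) % m = (t * (a' * b')) % m := by
  rw [Int.mul_emod (a*b) t, Int.mul_emod a b, ha, hb, ← Int.mul_emod a' b', ← Int.mul_emod]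
  congr 1; ring

-- the divide-and-conquer recursion computes c × (product of all other entries) everywhere
theorem combine_eq (m : Int) (hm : 0 < m) :
    ∀ (n : Nat) (vs : List Int), vs.length = n → ∀ (c : Int), c % m = c →
      combine m vs c
        = (List.range vs.length).map
            (fun i => (c * ((vs.take i).prod * (vs.drop (i+1)).prod)) % m) := by
  intro n
  induction n using Nat.strong_induction_on with
  | _ n ih =>
    intro vs hn c hc
    rw [combine]
    by_cases hle : vs.length ≤ 1
    · rw [if_pos hle]
      match vs, hle with
      | [], _ => simp
      | [v], _ => simp [List.range_succ, hc]
    · rw [if_neg hle]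
      dsimp only
      have h2 : 2 ≤ vs.length := by omega
      set k := vs.length / 2 with hk
      have hk1 : 1 ≤ k := by omega
      have hklt : k < vs.length := by omega
      have hLlen : (vs.take k).length = k := by simp; omega
      have hRlen : (vs.drop k).length = vs.length - k := by simp
      have hcL : PySem.Int.mod (c * segProd m (vs.drop k)) m % m
          = PySem.Int.mod (c * segProd m (vs.drop k)) m := mod_idem hm _
      have hcR : PySem.Int.mod (c * segProd m (vs.take k)) m % m
          = PySem.Int.mod (c * segProd m (vs.take k)) m := mod_idem hm _
      rw [ih k (by omega) (vs.take k) hLlen _ hcL,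
          ih (vs.length - k) (by omega) (vs.drop k) hRlen _ hcR]
      have hsplit : vs.length = k + (vs.length - k) := by omega
      rw [hLlen, hRlen]
      conv_rhs => rw [hsplit, List.range_add, List.map_append, List.map_map]
      have hcongR : PySem.Int.mod (c * segProd m (vs.drop k)) m % m
          = (c * (vs.drop k).prod) % m := by
        rw [mod_idem hm, PySem.Int.mod_eq_emod_of_pos hm, ← emod_absorb_right c,
            segProd_mod m hm, emod_absorb_right]
      have hcongL : PySem.Int.mod (c * segProd m (vs.take k)) m % m
          = (c * (vs.take k).prod) % m := by
        rw [mod_idem hm, PySem.Int.mod_eq_emod_of_pos hm, ← emod_absorb_right c,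
            segProd_mod m hm, emod_absorb_right]
      congr 1
      · apply List.map_congr_left
        intro i hi
        have hik : i < k := List.mem_range.mp hi
        have ht : (vs.take k).take i = vs.take i := by
          rw [List.take_take]; congr 1; omega
        have hd : vs.drop (i+1) = (vs.take k).drop (i+1) ++ vs.drop k := by
          conv_lhs => rw [← List.take_append_drop k vs]
          rw [List.drop_append_of_le_length (by rw [hLlen]; omega)]
        have hX : (vs.take i).prod * (vs.drop (i+1)).prod
            = (vs.drop k).prod * (((vs.take k).take i).prod * ((vs.take k).drop (i+1)).prod) := by
          rw [ht, hd, List.prod_append]; ring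
        rw [hX, emod_mul_congr _ hcongR]
        congr 1; ring
      · apply List.map_congr_left
        intro j hj
        simp only [Function.comp_apply]
        have ht : vs.take (k + j) = vs.take k ++ (vs.drop k).take j := by
          conv_lhs => rw [← List.take_append_drop k vs, List.take_append]
          rw [List.take_of_length_le (l := vs.take k) (by simp)]
          congr 2
          simp
          omega
        have hd : vs.drop (k + j + 1) = (vs.drop k).drop (j+1) := by
          rw [List.drop_drop]; congr 1
        have hX : (vs.take (k + j)).prod * (vs.drop (k + j + 1)).prod
            = (vs.take k).prod * (((vs.drop k).take j).prod * ((vs.drop k).drop (j+1)).prod) := by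
          rw [ht, hd, List.prod_append]; ring
        rw [hX, emod_mul_congr _ hcongL]
        congr 1; ring

-- ===== VERDICT (by name: the statement is the Claim_ definition above) =====
theorem multi_inv_spec : Claim_equal_multi_inv := by
  intro values modulus _ hpre
  have hm : (0:Int) < modulus := hpre
  unfold Spec_multi_inv multi_inv multi_inv_alt
  simp only [PySem.List.len_eq]
  rw [PySem.List.foldl_pyRange_zero_pyGetD' values 0
        (fun ps v => ps ++ [PySem.Int.mod (PySem.List.pyGetD ps (-1) 0 * v) modulus]) [1]]
  have hpart := foldA_eq_prefixTab modulus values [] 1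
  simp only [List.nil_append] at hpart
  rw [hpart]
  have hne : prefixTab modulus 1 values ≠ [] := prefixTab_ne_nil modulus 1 values
  have hbase : PySem.List.pyGetD (prefixTab modulus 1 values) (-1) 0
      = segProd modulus values := by
    rw [PySem.List.pyGetD_neg_one _ _ hne, List.getLast_eq_getElem,
        ← List.getD_eq_getElem _ 0 (by rw [length_prefixTab]; omega)]
    have : (prefixTab modulus 1 values).length - 1 = values.length := by
      rw [length_prefixTab]; omega
    rw [this, prefixTab_last]
    rfl
  rw [hbase]
  set T := pyPow3 (segProd modulus values) (modulus - 2) modulus with hT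
  rw [loopA_eq values modulus T hm (prefixTab modulus 1 values) values.length
        (List.replicate values.length 0) T le_rfl (by simp)
        (by simp [List.drop_length, suffixTab])]
  rw [combine_eq modulus hm values.length values rfl T (pyPow3_mod _ _ _ hm)]
  simp only [List.drop_replicate, Nat.sub_self, List.replicate_zero, List.append_nil]
  apply List.map_congr_left
  intro j hj
  have hj' : j < values.length := List.mem_range.mp hj
  have hpre' : (prefixTab modulus 1 values).getD j 0 % modulus
      = (values.take j).prod % modulus := by
    rw [prefixTab_getD_mod modulus hm values 1 j (le_of_lt hj'), one_mul]
  have hsuf : (suffixTab modulus values).getD (j + 1) 0 % modulus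
      = (values.drop (j+1)).prod % modulus := by
    rw [suffixTab_getD modulus values (j+1) hj', suffixTab_headI_mod modulus hm]
  exact mod_mul3 T hpre' hsuf
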